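-- pv_equiv track=rewrite | github.com/pranavh723/t1x2 | t1x2y1/handlers/room_management.py | validate_bingo_card
-- ===== SOURCE A (Python) =====
-- from typing import Optional, List, Dict, Any
--
-- def validate_bingo_card(card: List[List[int]]) -> bool:
--     """Validate a bingo card"""
--     if len(card) != 5:
--         return False
--
--     for row in card:
--         if len(row) != 5:
--             return False
--
--     # Check if all numbers are unique
--     all_numbers = [num for row in card for num in row]
--     return len(all_numbers) == len(set(all_numbers))
-- ===== SOURCE B (Python) =====
-- def validate_bingo_card(card):
--     """Validate a bingo card: 5x5 shape and all numbers distinct."""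
--     if len(card) != 5:
--         return False
--     for row in card:
--         if len(row) != 5:
--             return False
--     # sort-then-scan duplicate detection: any duplicate ends up adjacent
--     nums = sorted(n for row in card for n in row)
--     for a, b in zip(nums, nums[1:]):
--         if a == b:
--             return False
--     return True
-- ===== Notes on version B (the rewrite author's own statement) =====
-- stated objective: alternative
-- what changed: Uniqueness is checked by sorting the flattened card and scanning adjacent pairs for an equal neighbour, instead of comparing the list length with the length of a hash set built from it.
import Mathlib
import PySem

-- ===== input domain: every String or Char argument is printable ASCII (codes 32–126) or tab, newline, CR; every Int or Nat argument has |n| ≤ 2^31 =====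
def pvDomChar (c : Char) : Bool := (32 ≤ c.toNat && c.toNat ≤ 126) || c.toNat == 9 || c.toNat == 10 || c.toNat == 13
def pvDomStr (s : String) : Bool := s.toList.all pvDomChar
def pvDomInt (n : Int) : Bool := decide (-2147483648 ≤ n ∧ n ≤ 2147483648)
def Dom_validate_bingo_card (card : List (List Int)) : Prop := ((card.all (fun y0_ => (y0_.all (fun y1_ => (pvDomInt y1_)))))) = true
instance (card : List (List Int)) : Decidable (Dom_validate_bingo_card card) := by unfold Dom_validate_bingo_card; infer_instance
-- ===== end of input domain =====

-- B replaces A's set-based uniqueness test by sort-then-adjacent-scan duplicate detection (objective: alternative).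

-- ===== PORT A =====
def validate_bingo_card (card : List (List Int)) : Bool :=
  if card.length ≠ 5 then false
  else if card.any (fun row => row.length ≠ 5) then false  -- the early-return for-loop over rows
  else
    let all_numbers := card.flatMap (fun row => row)
    all_numbers.length == (PySem.Set.ofList all_numbers).length

-- ===== PORT B =====
-- the zip(nums, nums[1:]) early-return scan for an equal adjacent pair
def pvNoAdjDup : List Int → Bool
  | x :: y :: t => if x == y then false else pvNoAdjDup (y :: t)
  | _ => true

def validate_bingo_card_alt (card : List (List Int)) : Bool :=
  if card.length ≠ 5 then false
  else if card.any (fun row => row.length ≠ 5) then false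
  else
    let nums := PySem.List.sorted (card.flatMap (fun row => row)) (fun n => n) false
    pvNoAdjDup nums

-- ===== PRECONDITION & SPEC =====
def Spec_validate_bingo_card (card : List (List Int)) (out : Bool) : Prop := out = validate_bingo_card_alt card
instance (card : List (List Int)) (out : Bool) : Decidable (Spec_validate_bingo_card card out) := by unfold Spec_validate_bingo_card; infer_instance

-- ===== CLAIM (what is proved, stated in full; the proofs are below) =====
def Claim_equal_validate_bingo_card : Prop := ∀ (card : List (List Int)), Dom_validate_bingo_card card → Spec_validate_bingo_card card (validate_bingo_card card)

-- ===== LEMMAS AND PROOFS =====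

-- A's test: len(xs) == len(set(xs)) iff xs has no duplicates
lemma foldl_add_length_iff (xs : List Int) : ∀ (s : List Int),
    ((xs.foldl PySem.Set.add s).length = s.length + xs.length ↔ ((∀ x ∈ xs, x ∉ s) ∧ xs.Nodup)) ∧
    (xs.foldl PySem.Set.add s).length ≤ s.length + xs.length := by
  induction xs with
  | nil => intro s; simp
  | cons x t ih =>
    intro s
    by_cases hx : x ∈ s
    · have hadd : PySem.Set.add s x = s := by
        simp [PySem.Set.add, PySem.Set.contains, hx]
      constructor
      · rw [List.foldl_cons, hadd]
        constructor
        · intro hlen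
          exfalso
          have := (ih s).2
          rw [List.length_cons] at hlen
          omega
        · rintro ⟨hall, -⟩
          exact absurd hx (hall x (by simp))
      · rw [List.foldl_cons, hadd]
        have := (ih s).2; simp [List.length_cons]; omega
    · have hadd : PySem.Set.add s x = s ++ [x] := by
        simp [PySem.Set.add, PySem.Set.contains, hx]
      have hlen' : (s ++ [x]).length = s.length + 1 := by simp
      constructor
      · rw [List.foldl_cons, hadd]
        have h2 := (ih (s ++ [x])).1
        rw [List.length_cons]
        have heq : s.length + (t.length + 1) = (s ++ [x]).length + t.length := by
          rw [hlen']; omega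
        rw [heq, h2]
        simp only [List.mem_append, List.mem_singleton, not_or, List.forall_mem_cons,
          List.nodup_cons]
        constructor
        · rintro ⟨hall, hnd⟩
          refine ⟨⟨hx, fun z hz => (hall z hz).1⟩, ?_, hnd⟩
          intro hxt
          exact (hall x hxt).2 rfl
        · rintro ⟨⟨-, hall⟩, hxt, hnd⟩
          exact ⟨fun z hz => ⟨hall z hz, fun hzx => hxt (hzx ▸ hz)⟩, hnd⟩
      · rw [List.foldl_cons, hadd]
        have := (ih (s ++ [x])).2
        simp at this ⊢; omega

lemma ofList_length_iff (xs : List Int) :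
    ((PySem.Set.ofList xs).length = xs.length) ↔ xs.Nodup := by
  rw [PySem.Set.ofList_eq_foldl]
  have h := (foldl_add_length_iff xs []).1
  simp only [List.length_nil, Nat.zero_add] at h
  rw [h]
  simp

-- B's test: no equal adjacent pair in a sorted list iff no duplicates
lemma noAdjDup_chain' (l : List Int) : pvNoAdjDup l = true ↔ l.IsChain (· ≠ ·) := by
  induction l with
  | nil => simp [pvNoAdjDup]
  | cons x t ih =>
    cases t with
    | nil => simp [pvNoAdjDup]
    | cons y u =>
      rw [pvNoAdjDup]
      by_cases hxy : x = y <;>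
        simp [hxy, ih, List.isChain_cons_cons]

lemma sorted_nodup_iff (l : List Int) (h : l.Pairwise (· ≤ ·)) :
    (l.IsChain (· ≠ ·) ↔ l.Nodup) := by
  induction l with
  | nil => simp
  | cons x t ih =>
    rcases List.pairwise_cons.1 h with ⟨hx, hp⟩
    cases t with
    | nil => simp
    | cons y u =>
      rw [List.isChain_cons_cons, List.nodup_cons, ih hp]
      rcases List.pairwise_cons.1 hp with ⟨hy, -⟩
      constructor
      · rintro ⟨hxy, hc⟩
        refine ⟨?_, hc⟩
        intro hmem
        rcases List.mem_cons.1 hmem with rfl | hmu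
        · exact hxy rfl
        · have h1 : x ≤ y := hx y (by simp)
          have h2 : y ≤ x := hy x hmu
          exact hxy (le_antisymm h1 h2)
      · rintro ⟨hnm, hnd⟩
        exact ⟨fun hxy => hnm (hxy ▸ List.mem_cons_self), hnd⟩

-- ===== VERDICT (by name: the statement is the Claim_ definition above) =====
theorem validate_bingo_card_spec : Claim_equal_validate_bingo_card := by
  intro card _
  unfold Spec_validate_bingo_card validate_bingo_card validate_bingo_card_alt
  split_ifs with h1 h2
  · rfl
  · rfl
  · set xs := card.flatMap (fun row => row) with hxs
    set srt := PySem.List.sorted xs (fun n => n) false with hs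
    have hperm : srt.Perm xs := PySem.List.sorted_perm xs (fun n => n) false
    have hA : (xs.length == (PySem.Set.ofList xs).length) = decide xs.Nodup := by
      rcases Classical.em xs.Nodup with h | h
      · simp [h, (ofList_length_iff xs).2 h]
      · rw [decide_eq_false h]
        simp only [beq_eq_false_iff_ne, ne_eq]
        intro hc
        exact h ((ofList_length_iff xs).1 hc.symm)
    have hB : pvNoAdjDup srt = decide xs.Nodup := by
      have hp : srt.Pairwise (fun a b => a ≤ b) := PySem.List.sorted_pairwise xs (fun n => n)
      rcases Classical.em xs.Nodup with h | h
      · simp [noAdjDup_chain', h, (sorted_nodup_iff srt hp).2 (hperm.nodup_iff.2 h)]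
      · rw [decide_eq_false h]
        rcases Bool.eq_false_or_eq_true (pvNoAdjDup srt) with hb | hb
        · exact absurd (hperm.nodup_iff.1 ((sorted_nodup_iff srt hp).1 ((noAdjDup_chain' srt).1 hb))) h
        · exact hb
    rw [hA, hB]
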